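-- pv_equiv track=rewrite | github.com/HuuHuy227/ASR | chunkformer/utils/model_utils.py | replace_duplicates_with_blank
-- ===== SOURCE A (Python) =====
-- from typing import List, Tuple
--
-- def replace_duplicates_with_blank(hyp: List[int], blank_id: int = 0) -> List[int]:
--     new_hyp: List[int] = []
--     cur = 0
--     while cur < len(hyp):
--         new_hyp.append(hyp[cur])
--         prev = cur
--         cur += 1
--         while cur < len(hyp) and hyp[cur] == hyp[prev] and hyp[cur] != blank_id:
--             new_hyp.append(blank_id)
--             cur += 1
--     return new_hyp
-- ===== SOURCE B (Python) =====
-- from typing import List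
--
-- def replace_duplicates_with_blank(hyp: List[int], blank_id: int = 0) -> List[int]:
--     if not hyp:
--         return []
--     return [hyp[0]] + [blank_id if b == a and b != blank_id else b
--                        for a, b in zip(hyp, hyp[1:])]
-- ===== Notes on version B (the rewrite author's own statement) =====
-- stated objective: simpler
-- what changed: Replaces A's nested while loops over a run-start index with a single flat pairwise pass (zip of the list with its tail) that compares each element to its immediate predecessor.
import Mathlib
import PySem

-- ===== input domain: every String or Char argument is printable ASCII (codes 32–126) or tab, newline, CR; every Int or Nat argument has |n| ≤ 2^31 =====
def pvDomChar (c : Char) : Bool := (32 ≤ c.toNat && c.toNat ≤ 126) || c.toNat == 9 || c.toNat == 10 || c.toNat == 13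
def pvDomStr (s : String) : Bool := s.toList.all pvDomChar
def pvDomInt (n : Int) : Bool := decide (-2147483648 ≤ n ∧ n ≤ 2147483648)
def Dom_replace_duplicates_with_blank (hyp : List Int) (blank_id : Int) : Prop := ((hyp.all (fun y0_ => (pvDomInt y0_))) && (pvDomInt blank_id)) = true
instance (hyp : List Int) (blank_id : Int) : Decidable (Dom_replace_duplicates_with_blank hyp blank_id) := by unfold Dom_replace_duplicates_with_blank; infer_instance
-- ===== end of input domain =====

-- B replaces A's nested while loops (run-start index) by a single flat pairwise pass; objective: simpler.

-- ===== PORT A =====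
-- inner while loop of A: appends blank_id while hyp[cur] == hyp[prev] != blank_id
def pvInnerA (hyp : List Int) (blank_id : Int) (prev : Nat) (acc : List Int) (cur : Nat) :
    List Int × Nat :=
  if h : cur < hyp.length ∧ hyp.getD cur 0 = hyp.getD prev 0 ∧ hyp.getD cur 0 ≠ blank_id then
    pvInnerA hyp blank_id prev (acc ++ [blank_id]) (cur + 1)
  else
    (acc, cur)
termination_by hyp.length - cur
decreasing_by omega

-- the inner loop only moves the index forward (needed for the outer loop's termination)
theorem pvInnerA_ge (hyp : List Int) (blank_id : Int) (prev : Nat) (acc : List Int) (cur : Nat) :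
    cur ≤ (pvInnerA hyp blank_id prev acc cur).2 := by
  fun_induction pvInnerA with
  | case1 acc cur h ih => omega
  | case2 => simp

-- outer while loop of A
def pvOuterA (hyp : List Int) (blank_id : Int) (acc : List Int) (cur : Nat) : List Int :=
  if h : cur < hyp.length then
    let r := pvInnerA hyp blank_id cur (acc ++ [hyp.getD cur 0]) (cur + 1)
    pvOuterA hyp blank_id r.1 r.2
  else
    acc
termination_by hyp.length - cur
decreasing_by
  have := pvInnerA_ge hyp blank_id cur (acc ++ [hyp.getD cur 0]) (cur + 1)
  omega

def replace_duplicates_with_blank (hyp : List Int) (blank_id : Int) : List Int :=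
  pvOuterA hyp blank_id [] 0

-- ===== PORT B =====
def replace_duplicates_with_blank_alt (hyp : List Int) (blank_id : Int) : List Int :=
  match hyp with
  | [] => []
  | h :: t =>
      h :: (List.zip (h :: t) t).map
        (fun p => if p.2 = p.1 ∧ p.2 ≠ blank_id then blank_id else p.2)

-- ===== PRECONDITION & SPEC =====
def Spec_replace_duplicates_with_blank (hyp : List Int) (blank_id : Int) (out : List Int) : Prop := out = replace_duplicates_with_blank_alt hyp blank_id
instance (hyp : List Int) (blank_id : Int) (out : List Int) : Decidable (Spec_replace_duplicates_with_blank hyp blank_id out) := by unfold Spec_replace_duplicates_with_blank; infer_instance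

-- ===== CLAIM (what is proved, stated in full; the proofs are below) =====
def Claim_equal_replace_duplicates_with_blank : Prop := ∀ (hyp : List Int) (blank_id : Int), Dom_replace_duplicates_with_blank hyp blank_id → Spec_replace_duplicates_with_blank hyp blank_id (replace_duplicates_with_blank hyp blank_id)

-- ===== LEMMAS AND PROOFS =====

-- length of the leading run of elements equal to v and ≠ blank_id
def pvRun (blank_id v : Int) : List Int → Nat
  | [] => 0
  | x :: t => if x = v ∧ x ≠ blank_id then pvRun blank_id v t + 1 else 0

-- flat single pass keeping the previous element (the shape of B's pairwise map)
def pvFlat (blank_id prev : Int) : List Int → List Int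
  | [] => []
  | x :: t => (if x = prev ∧ x ≠ blank_id then blank_id else x) :: pvFlat blank_id x t

-- the flat pass restarted at the head of a list
def pvG (blank_id : Int) : List Int → List Int
  | [] => []
  | x :: t => x :: pvFlat blank_id x t

theorem pvG_cons (blank_id x : Int) (t : List Int) :
    pvG blank_id (x :: t) = x :: pvFlat blank_id x t := rfl

theorem pvInnerA_eq (hyp : List Int) (blank_id : Int) (prev : Nat) (acc : List Int) (cur : Nat) :
    pvInnerA hyp blank_id prev acc cur =
      (acc ++ List.replicate (pvRun blank_id (hyp.getD prev 0) (hyp.drop cur)) blank_id,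
       cur + pvRun blank_id (hyp.getD prev 0) (hyp.drop cur)) := by
  fun_induction pvInnerA with
  | case1 acc cur h ih =>
      obtain ⟨hlt, heq, hne⟩ := h
      have hg : hyp.getD cur 0 = hyp[cur] := List.getD_eq_getElem hyp 0 hlt
      rw [List.drop_eq_getElem_cons hlt, ih]
      simp only [pvRun, if_pos (show hyp[cur] = hyp.getD prev 0 ∧ hyp[cur] ≠ blank_id from
        ⟨hg ▸ heq, hg ▸ hne⟩), Prod.mk.injEq]
      constructor
      · rw [List.replicate_succ]; simp
      · omega
  | case2 acc cur h =>
      by_cases hlt : cur < hyp.length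
      · have hg : hyp.getD cur 0 = hyp[cur] := List.getD_eq_getElem hyp 0 hlt
        rw [List.drop_eq_getElem_cons hlt]
        simp only [pvRun]
        rw [if_neg (by rw [← hg]; tauto)]
        simp
      · rw [List.drop_eq_nil_of_le (by omega)]
        simp [pvRun]

-- the flat pass splits as a run of blanks followed by a restart
theorem pvFlat_run (blank_id : Int) (t : List Int) : ∀ v : Int,
    pvFlat blank_id v t =
      List.replicate (pvRun blank_id v t) blank_id ++
        pvG blank_id (t.drop (pvRun blank_id v t)) := by
  induction t with
  | nil => intro v; simp [pvFlat, pvRun, pvG]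
  | cons x t ih =>
      intro v
      simp only [pvFlat, pvRun]
      split_ifs with hc
      · obtain ⟨hv, hb⟩ := hc
        subst hv
        rw [ih x, List.replicate_succ, List.drop_succ_cons]
        simp
      · simp [pvG]

theorem pvOuterA_eq (hyp : List Int) (blank_id : Int) (acc : List Int) (cur : Nat) :
    pvOuterA hyp blank_id acc cur = acc ++ pvG blank_id (hyp.drop cur) := by
  fun_induction pvOuterA with
  | case1 acc cur hlt r ih =>
      have hr : r = pvInnerA hyp blank_id cur (acc ++ [hyp.getD cur 0]) (cur + 1) := rfl
      rw [hr, pvInnerA_eq] at ih ⊢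
      dsimp only at ih ⊢
      rw [ih]
      have hg : hyp.getD cur 0 = hyp[cur] := List.getD_eq_getElem hyp 0 hlt
      rw [hg, List.drop_eq_getElem_cons hlt, pvG_cons,
        pvFlat_run blank_id _ hyp[cur], List.drop_drop]
      simp
  | case2 acc cur hlt =>
      rw [List.drop_eq_nil_of_le (by omega)]
      simp [pvG]

-- B's pairwise map computes the flat pass
theorem pvZip_eq_pvFlat (blank_id : Int) (t : List Int) : ∀ h : Int,
    (List.zip (h :: t) t).map
        (fun p => if p.2 = p.1 ∧ p.2 ≠ blank_id then blank_id else p.2) =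
      pvFlat blank_id h t := by
  induction t with
  | nil => intro h; simp [pvFlat]
  | cons x t ih => intro h; simp [pvFlat, ← ih x, List.zip]

-- ===== VERDICT (by name: the statement is the Claim_ definition above) =====
theorem replace_duplicates_with_blank_spec : Claim_equal_replace_duplicates_with_blank := by
  intro hyp blank_id _
  unfold Spec_replace_duplicates_with_blank replace_duplicates_with_blank
  rw [pvOuterA_eq]
  cases hyp with
  | nil => simp [pvG, replace_duplicates_with_blank_alt]
  | cons h t =>
      simp only [List.drop_zero, List.nil_append, replace_duplicates_with_blank_alt, pvG]
      rw [pvZip_eq_pvFlat]
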